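-- pv_equiv track=rewrite | github.com/TUC01108/cp | unit4/s1/pr7.py | validate_nft_actions
-- ===== SOURCE A (Python) =====
-- def validate_nft_actions(actions):
--     sum = 0
--     for val in actions:
--         if val == "add":
--             sum += 1
--         if val == "remove":
--             sum -= 1
--         if sum < 0:
--             return False
--     return sum == 0
--
-- actions = ["add", "add", "remove", "remove"]
-- ===== SOURCE B (Python) =====
-- def validate_nft_actions(actions):
--     # Divide-and-conquer: summarize each half as (unmatched removes, unmatched adds)
--     # and merge the summaries; the whole list is valid iff its summary is (0, 0).
--     def summary(lo, hi):
--         if hi - lo <= 1: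
--             if hi == lo:
--                 return (0, 0)
--             a = actions[lo]
--             if a == "add":
--                 return (0, 1)
--             if a == "remove":
--                 return (1, 0)
--             return (0, 0)
--         mid = (lo + hi) // 2
--         r1, a1 = summary(lo, mid)
--         r2, a2 = summary(mid, hi)
--         m = min(a1, r2)
--         return (r1 + r2 - m, a1 + a2 - m)
--     return summary(0, len(actions)) == (0, 0)
-- ===== Notes on version B (the rewrite author's own statement) =====
-- stated objective: alternative
-- what changed: B replaces A's left-to-right running-balance loop with a divide-and-conquer reduction: each half of the list is summarized as a pair (unmatched removes, unmatched adds), the two summaries are merged monoid-style, and the sequence is valid iff the whole summary is (0, 0).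
import Mathlib
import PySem

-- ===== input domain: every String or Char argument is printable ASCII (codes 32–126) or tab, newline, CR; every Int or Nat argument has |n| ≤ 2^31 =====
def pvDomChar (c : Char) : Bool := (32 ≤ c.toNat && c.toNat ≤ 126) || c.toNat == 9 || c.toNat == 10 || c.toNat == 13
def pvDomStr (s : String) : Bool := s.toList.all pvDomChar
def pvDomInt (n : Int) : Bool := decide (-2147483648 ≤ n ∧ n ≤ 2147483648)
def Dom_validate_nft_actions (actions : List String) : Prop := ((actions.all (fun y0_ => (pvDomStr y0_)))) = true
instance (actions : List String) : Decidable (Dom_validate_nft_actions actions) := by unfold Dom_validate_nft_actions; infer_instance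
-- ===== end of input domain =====

-- B replaces A's left-to-right running-balance loop with a divide-and-conquer
-- merge of (unmatched removes, unmatched adds) summaries (objective: alternative algorithm).


-- ===== PORT A =====
-- A: loop over actions; two sequential ifs update sum; early return False when sum < 0
def validateLoopA : List String → Int → Bool
  | [], s => s == 0
  | v :: rest, s =>
    let s1 := if v == "add" then s + 1 else s
    let s2 := if v == "remove" then s1 - 1 else s1
    if s2 < 0 then false else validateLoopA rest s2

def validate_nft_actions (actions : List String) : Bool :=
  validateLoopA actions 0

-- ===== PORT B =====
-- B: merge of two summaries (unmatched removes, unmatched adds)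
def combineB (s1 s2 : Int × Int) : Int × Int :=
  let m := min s1.2 s2.1
  (s1.1 + s2.1 - m, s1.2 + s2.2 - m)

-- B: summary(lo, hi) ported on the sublist actions[lo:hi]
def summaryB : List String → Int × Int
  | [] => (0, 0)
  | [a] => if a == "add" then (0, 1) else if a == "remove" then (1, 0) else (0, 0)
  | a :: b :: rest =>
    let mid := (a :: b :: rest).length / 2
    combineB (summaryB ((a :: b :: rest).take mid)) (summaryB ((a :: b :: rest).drop mid))
termination_by l => l.length
decreasing_by
  · simp; omega
  · simp; omega

def validate_nft_actions_alt (actions : List String) : Bool :=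
  summaryB actions == (0, 0)

-- ===== PRECONDITION & SPEC =====
def Spec_validate_nft_actions (actions : List String) (out : Bool) : Prop := out = validate_nft_actions_alt actions
instance (actions : List String) (out : Bool) : Decidable (Spec_validate_nft_actions actions out) := by unfold Spec_validate_nft_actions; infer_instance

-- ===== CLAIM (what is proved, stated in full; the proofs are below) =====
def Claim_equal_validate_nft_actions : Prop := ∀ (actions : List String), Dom_validate_nft_actions actions → Spec_validate_nft_actions actions (validate_nft_actions actions)

-- ===== LEMMAS AND PROOFS =====

lemma bool_ext {p q : Bool} (h : p = true ↔ q = true) : p = q := by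
  cases p <;> cases q <;> simp_all

-- singleton summary
def singB (a : String) : Int × Int :=
  if a == "add" then (0, 1) else if a == "remove" then (1, 0) else (0, 0)

-- left-to-right fold reference form of the summary
def sumF (l : List String) : Int × Int :=
  l.foldr (fun x s => combineB (singB x) s) (0, 0)

lemma singB_nonneg (a : String) : 0 ≤ (singB a).1 ∧ 0 ≤ (singB a).2 := by
  unfold singB; split_ifs <;> simp

lemma combineB_nonneg {x y : Int × Int} (hx : 0 ≤ x.1 ∧ 0 ≤ x.2) (hy : 0 ≤ y.1 ∧ 0 ≤ y.2) :
    0 ≤ (combineB x y).1 ∧ 0 ≤ (combineB x y).2 := by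
  unfold combineB; dsimp; omega

lemma sumF_nonneg (l : List String) : 0 ≤ (sumF l).1 ∧ 0 ≤ (sumF l).2 := by
  induction l with
  | nil => simp [sumF]
  | cons a rest ih => exact combineB_nonneg (singB_nonneg a) ih

lemma combineB_assoc (x y z : Int × Int) :
    combineB (combineB x y) z = combineB x (combineB y z) := by
  obtain ⟨x1, x2⟩ := x; obtain ⟨y1, y2⟩ := y; obtain ⟨z1, z2⟩ := z
  simp only [combineB, Prod.mk.injEq]
  constructor <;> omega

lemma combineB_zero_left {y : Int × Int} (hy : 0 ≤ y.1) : combineB (0, 0) y = y := by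
  obtain ⟨y1, y2⟩ := y
  dsimp at hy
  simp only [combineB, Prod.mk.injEq]
  omega

lemma sumF_cons (a : String) (l : List String) :
    sumF (a :: l) = combineB (singB a) (sumF l) := rfl

lemma sumF_append (l1 l2 : List String) :
    sumF (l1 ++ l2) = combineB (sumF l1) (sumF l2) := by
  induction l1 with
  | nil => exact (combineB_zero_left (sumF_nonneg l2).1).symm
  | cons a rest ih =>
    rw [List.cons_append, sumF_cons, ih, sumF_cons, combineB_assoc]

lemma summaryB_eq_sumF (l : List String) : summaryB l = sumF l := by
  fun_induction summaryB l with
  | case1 => rfl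
  | case2 a h =>
    simp only [beq_iff_eq] at h
    simp [sumF, combineB, singB, h]
  | case3 a h1 h2 =>
    simp only [beq_iff_eq] at h1 h2
    simp [sumF, combineB, singB, h2]
  | case4 a h1 h2 =>
    simp only [beq_iff_eq] at h1 h2
    simp [sumF, combineB, singB, h1, h2]
  | case5 a b rest mid ih1 ih2 =>
    simp only [ih1, ih2]
    rw [← sumF_append, List.take_append_drop]

-- core: A's loop from a nonnegative state k equals the summary condition
lemma loopA_eq_sumF (l : List String) (k : Int) (hk : 0 ≤ k) :
    validateLoopA l k = (((sumF l).1 ≤ k) && (k + (sumF l).2 - (sumF l).1 == 0)) := by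
  induction l generalizing k with
  | nil =>
    apply bool_ext
    simp only [validateLoopA, sumF, List.foldr_nil, beq_iff_eq, Bool.and_eq_true,
      decide_eq_true_eq]
    omega
  | cons a rest ih =>
    have hr0 := sumF_nonneg rest
    rcases hsum : sumF rest with ⟨r, aa⟩
    rw [hsum] at hr0
    have hr : 0 ≤ r ∧ 0 ≤ aa := hr0
    rw [sumF_cons, hsum]
    by_cases ha : a = "add"
    · subst ha
      have e : validateLoopA ("add" :: rest) k
          = if k + 1 < 0 then false else validateLoopA rest (k + 1) := by
        simp [validateLoopA]
      rw [e, if_neg (by omega), ih (k + 1) (by omega), hsum]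
      apply bool_ext
      have hsing : singB "add" = ((0 : Int), (1 : Int)) := rfl
      simp only [hsing, combineB, Bool.and_eq_true, decide_eq_true_eq, beq_iff_eq]
      constructor <;> intro h <;> omega
    · by_cases hb : a = "remove"
      · subst hb
        have hsing : singB "remove" = ((1 : Int), (0 : Int)) := rfl
        have e : validateLoopA ("remove" :: rest) k
            = if k - 1 < 0 then false else validateLoopA rest (k - 1) := by
          simp [validateLoopA]
        by_cases hk0 : k = 0
        · subst hk0
          rw [e, if_pos (by omega)]
          apply bool_ext
          simp only [hsing, combineB, Bool.false_eq_true, false_iff, Bool.and_eq_true,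
            decide_eq_true_eq, beq_iff_eq, not_and]
          omega
        · rw [e, if_neg (by omega), ih (k - 1) (by omega), hsum]
          apply bool_ext
          simp only [hsing, combineB, Bool.and_eq_true, decide_eq_true_eq, beq_iff_eq]
          constructor <;> intro h <;> omega
      · have hsing : singB a = ((0 : Int), (0 : Int)) := by
          simp [singB, ha, hb]
        have e : validateLoopA (a :: rest) k
            = if k < 0 then false else validateLoopA rest k := by
          simp [validateLoopA, beq_iff_eq, ha, hb]
        rw [e, if_neg (by omega), ih k hk, hsum]
        apply bool_ext
        simp only [hsing, combineB, Bool.and_eq_true, decide_eq_true_eq, beq_iff_eq]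
        constructor <;> intro h <;> omega

-- ===== VERDICT (by name: the statement is the Claim_ definition above) =====
theorem validate_nft_actions_spec : Claim_equal_validate_nft_actions := by
  intro actions _
  unfold Spec_validate_nft_actions validate_nft_actions validate_nft_actions_alt
  rw [summaryB_eq_sumF, loopA_eq_sumF actions 0 le_rfl]
  have h0 := sumF_nonneg actions
  rcases hsum : sumF actions with ⟨r, aa⟩
  rw [hsum] at h0
  have h : 0 ≤ r ∧ 0 ≤ aa := h0
  apply bool_ext
  simp only [Bool.and_eq_true, decide_eq_true_eq, beq_iff_eq, Prod.mk.injEq]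
  constructor <;> intro hx <;> omega
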